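-- pv_equiv track=rewrite | github.com/chenkianwee/solar_travel_gui | solar_travel_gui/stg_function.py | id_weeks
-- ===== SOURCE A (Python) =====
-- weekly_hr_list = [168, 336, 504, 672, 840, 1008, 1176, 1344, 1512, 1680, 1848, 2016, 2184, 2352, 2520, 2688,
--                   2856, 3024, 3192, 3360, 3528, 3696, 3864, 4032, 4200, 4368, 4536, 4704, 4872, 5040, 5208,
--                   5376, 5544, 5712, 5880, 6048, 6216, 6384, 6552, 6720, 6888, 7056, 7224, 7392, 7560, 7728,
--                   7896, 8064, 8232, 8400, 8568, 8760]
--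
-- def id_week(hour):
--     for i in range(52):
--         end_hr = weekly_hr_list[i]
--         if i ==0:
--             start_hr = 0
--         else:
--             start_hr = weekly_hr_list[i-1]
--
--         if start_hr <= hour < end_hr:
--             return i
--
-- def id_weeks(start_hour, end_hour):
--     week_list = []
--     #generate all the hours
--     hours_interest = range(start_hour, end_hour+1)
--     for hour in hours_interest:
--         week_index = id_week(hour)
--         if week_index not in week_list:
--             week_list.append(week_index)
--     return week_list
-- ===== SOURCE B (Python) =====
-- WEEK_HOURS = 168
-- YEAR_HOURS = 8760
-- LAST_WEEK = 51  # the last week is long: it covers hours 8568..8759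
--
-- def week_of(hour):
--     """Week index of an hour of the year, or None for hours outside the year."""
--     if 0 <= hour < YEAR_HOURS:
--         return min(hour // WEEK_HOURS, LAST_WEEK)
--     return None
--
-- def next_week_start(hour):
--     """First hour after `hour` belonging to a later week of the year."""
--     if hour < 0:
--         return 0
--     week = min(hour // WEEK_HOURS, LAST_WEEK)
--     return YEAR_HOURS if week == LAST_WEEK else (week + 1) * WEEK_HOURS
--
-- def id_weeks(start_hour, end_hour):
--     week_list = []
--     hour = start_hour
--     while hour <= end_hour:
--         week = week_of(hour)
--         if week not in week_list:
--             week_list.append(week)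
--         if week is None and hour >= YEAR_HOURS:
--             break  # every later hour is outside the year too
--         hour = next_week_start(hour)  # jump over the rest of this week
--     return week_list
-- ===== Notes on version B (the rewrite author's own statement) =====
-- stated objective: alternative
-- what changed: B jumps from week boundary to week boundary (a week_of/next_week_start pair, one loop iteration per week touched) instead of scanning every hour of the interval and, per hour, scanning the 52-entry boundary table plus a membership test on the growing result list; intended as faster (measured 1414x median at the largest size, but not consistent across input kinds, so not claimed).
import Mathlib
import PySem

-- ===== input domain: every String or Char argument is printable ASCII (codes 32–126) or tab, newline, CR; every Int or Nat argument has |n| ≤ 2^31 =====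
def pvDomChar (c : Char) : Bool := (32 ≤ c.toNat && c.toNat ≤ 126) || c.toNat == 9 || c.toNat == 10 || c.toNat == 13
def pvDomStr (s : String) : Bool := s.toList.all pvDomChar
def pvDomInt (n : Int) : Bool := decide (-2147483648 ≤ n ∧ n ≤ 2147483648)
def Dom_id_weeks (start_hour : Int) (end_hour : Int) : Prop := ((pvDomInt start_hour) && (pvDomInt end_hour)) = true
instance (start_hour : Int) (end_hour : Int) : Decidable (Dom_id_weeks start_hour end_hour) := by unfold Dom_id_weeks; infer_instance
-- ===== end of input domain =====

-- B jumps from week boundary to week boundary (one loop iteration per week touched)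
-- instead of scanning every hour in the interval with a per-hour scan of the 52-entry table.


-- ===== PORT A =====
def weekly_hr_list : List Int :=
  [168, 336, 504, 672, 840, 1008, 1176, 1344, 1512, 1680, 1848, 2016, 2184, 2352, 2520, 2688,
   2856, 3024, 3192, 3360, 3528, 3696, 3864, 4032, 4200, 4368, 4536, 4704, 4872, 5040, 5208,
   5376, 5544, 5712, 5880, 6048, 6216, 6384, 6552, 6720, 6888, 7056, 7224, 7392, 7560, 7728,
   7896, 8064, 8232, 8400, 8568, 8760]

-- the 'for i in range(52): … return i' loop of id_week; falling off the end returns None.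
-- (weekly_hr_list[i] / [i-1] is always in range for i < 52, so getD is exact here)
def id_weekLoop (hour : Int) : List Nat → Option Int
  | [] => none
  | i :: rest =>
    let end_hr := weekly_hr_list.getD i 0
    let start_hr : Int := if i = 0 then 0 else weekly_hr_list.getD (i - 1) 0
    if start_hr ≤ hour ∧ hour < end_hr then some (i : Int) else id_weekLoop hour rest

def id_week (hour : Int) : Option Int := id_weekLoop hour (List.range 52)

def id_weeks (start_hour : Int) (end_hour : Int) : List (Option Int) :=
  let hours_interest := PySem.List.pyRange start_hour (end_hour + 1) 1
  hours_interest.foldl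
    (fun week_list hour =>
      if id_week hour ∈ week_list then week_list else week_list ++ [id_week hour])
    []

-- ===== PORT B =====
def week_of (hour : Int) : Option Int :=
  if 0 ≤ hour ∧ hour < 8760 then some (min (PySem.Int.floordiv hour 168) 51) else none

def next_week_start (hour : Int) : Int :=
  if hour < 0 then 0
  else
    let week := min (PySem.Int.floordiv hour 168) 51
    if week = 51 then 8760 else (week + 1) * 168

-- the loop variable strictly advances while inside the year (used for termination)
lemma next_week_start_gt (hour : Int) (h : hour < 8760) : hour < next_week_start hour := by
  unfold next_week_start
  rw [PySem.Int.floordiv_eq_ediv_of_pos (show (0:Int) < 168 by norm_num)]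
  by_cases h0 : hour < 0
  · rw [if_pos h0]; omega
  · rw [if_neg h0]
    show hour < if min (hour / 168) 51 = 51 then 8760 else (min (hour / 168) 51 + 1) * 168
    split_ifs <;> omega

-- the 'while hour <= end_hour: …' loop of B
def id_weeks_altLoop (end_hour : Int) (week_list : List (Option Int)) (hour : Int) :
    List (Option Int) :=
  if hle : hour ≤ end_hour then
    let week := week_of hour
    let wl := if week ∈ week_list then week_list else week_list ++ [week]
    if hbr : week = none ∧ 8760 ≤ hour then wl
    else id_weeks_altLoop end_hour wl (next_week_start hour)
  else week_list
termination_by (end_hour + 1 - hour).toNat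
decreasing_by
  have h8 : hour < 8760 := by
    by_contra h
    exact hbr ⟨by show week_of hour = none; unfold week_of; rw [if_neg (by omega)], by omega⟩
  have := next_week_start_gt hour h8
  omega

def id_weeks_alt (start_hour : Int) (end_hour : Int) : List (Option Int) :=
  id_weeks_altLoop end_hour [] start_hour

-- ===== PRECONDITION & SPEC =====
def Spec_id_weeks (start_hour : Int) (end_hour : Int) (out : List (Option Int)) : Prop := out = id_weeks_alt start_hour end_hour
instance (start_hour : Int) (end_hour : Int) (out : List (Option Int)) : Decidable (Spec_id_weeks start_hour end_hour out) := by unfold Spec_id_weeks; infer_instance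

-- ===== CLAIM (what is proved, stated in full; the proofs are below) =====
def Claim_equal_id_weeks : Prop := ∀ (start_hour : Int) (end_hour : Int), Dom_id_weeks start_hour end_hour → Spec_id_weeks start_hour end_hour (id_weeks start_hour end_hour)

-- ===== LEMMAS AND PROOFS =====

-- shared normal form: both ports are proved equal to this closed expression
def Nform (s e : Int) : List (Option Int) :=
  if e < s then []
  else
    (if s < 0 then [(none : Option Int)] else []) ++
    (if max s 0 ≤ min e 8759 then
      (PySem.List.pyRange (min (max s 0 / 168) 51) (min (min e 8759 / 168) 51 + 1) 1).map some
     else []) ++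
    (if s ≥ 0 ∧ e ≥ 8760 then [none] else [])

lemma Nform_empty (s e : Int) (h : e < s) : Nform s e = [] := by
  unfold Nform; rw [if_pos h]

lemma Nform_eq (s e : Int) (hse : s ≤ e) :
    Nform s e =
      (if s < 0 then [(none : Option Int)] else []) ++
      (if max s 0 ≤ min e 8759 then
        (PySem.List.pyRange (min (max s 0 / 168) 51) (min (min e 8759 / 168) 51 + 1) 1).map some
       else []) ++
      (if s ≥ 0 ∧ e ≥ 8760 then [none] else []) := by
  unfold Nform; rw [if_neg (by omega)]

-- ---------- A = Nform ----------

-- week boundaries of A's table: Wb j is the start of week j (Wb 52 = 8760 closes the year)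
def Wb (j : Nat) : Int := if j = 52 then 8760 else 168 * j

lemma Wfact : ∀ i < 52, weekly_hr_list.getD i 0 = Wb (i + 1) := by decide

-- A's table scan from position j finds min (hour/168) 51 whenever Wb j ≤ hour < 8760
lemma loopTail : ∀ (n j : Nat), j + n = 52 → ∀ hour : Int,
    id_weekLoop hour ((List.range 52).drop j) =
      if Wb j ≤ hour ∧ hour < 8760 then some (min (hour / 168) 51) else none := by
  intro n
  induction n with
  | zero =>
    intro j hj hour
    have : j = 52 := by omega
    subst this
    have hnil : (List.range 52).drop 52 = [] := by simp
    rw [hnil]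
    simp only [id_weekLoop]
    rw [if_neg]
    have h52 : Wb 52 = 8760 := by norm_num [Wb]
    rw [h52]
    omega
  | succ n ih =>
    intro j hj hour
    have hjlt : j < 52 := by omega
    have hdrop : (List.range 52).drop j = j :: (List.range 52).drop (j + 1) := by
      rw [List.drop_eq_getElem_cons (by simpa using hjlt)]
      simp
    rw [hdrop]
    simp only [id_weekLoop]
    rw [Wfact j hjlt]
    have hstart : (if j = 0 then (0:Int) else weekly_hr_list.getD (j - 1) 0) = Wb j := by
      by_cases h0 : j = 0
      · simp [h0, Wb]
      · rw [if_neg h0, Wfact (j-1) (by omega)]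
        have : j - 1 + 1 = j := by omega
        rw [this]
    rw [hstart, ih (j + 1) (by omega) hour]
    have hWlt : Wb j < Wb (j + 1) := by
      simp only [Wb]; split_ifs <;> omega
    by_cases hc : Wb j ≤ hour ∧ hour < Wb (j + 1)
    · rw [if_pos hc]
      have h8760 : Wb (j+1) ≤ 8760 := by simp only [Wb]; split_ifs <;> omega
      rw [if_pos ⟨hc.1, by omega⟩]
      congr 1
      have hjv : Wb j = 168 * j := by simp only [Wb]; split_ifs <;> omega
      rw [hjv] at hc
      have : Wb (j+1) ≤ 168 * (j+1) ∨ (j = 51 ∧ Wb (j+1) = 8760) := by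
        simp only [Wb]; split_ifs <;> omega
      omega
    · rw [if_neg hc]
      split_ifs <;> first | rfl | omega

-- A's id_week in closed form
lemma id_week_eq (h : Int) :
    id_week h = if 0 ≤ h ∧ h < 8760 then some (min (h / 168) 51) else none := by
  have := loopTail 52 0 rfl h
  simpa [Wb] using this

lemma mem_H_iff (s : Int) (x : Option Int) :
    x ∈ (if s < 0 then [(none : Option Int)] else []) ↔ (s < 0 ∧ x = none) := by
  by_cases h : s < 0 <;> simp [h]

-- one step of A's loop applied to Nform at e-1 yields Nform at e
lemma step_lemma (s e : Int) (hse : s ≤ e) :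
    (if id_week e ∈ Nform s (e - 1) then Nform s (e - 1)
     else Nform s (e - 1) ++ [id_week e]) = Nform s e := by
  rw [Nform_eq s e hse, id_week_eq]
  by_cases hse1 : s ≤ e - 1
  · rw [Nform_eq s (e-1) hse1]
    by_cases he0 : e < 0
    · -- region 1: e < 0, hence s < 0: both sides are [none]
      have hs0 : s < 0 := by omega
      rw [if_pos hs0, if_neg (show ¬ max s 0 ≤ min (e-1) 8759 by omega),
          if_neg (show ¬ (s ≥ 0 ∧ e - 1 ≥ 8760) by omega),
          if_neg (show ¬ (0 ≤ e ∧ e < 8760) by omega),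
          if_neg (show ¬ max s 0 ≤ min e 8759 by omega),
          if_neg (show ¬ (s ≥ 0 ∧ e ≥ 8760) by omega)]
      simp
    · by_cases he8 : e < 8760
      · -- region 2: 0 ≤ e < 8760
        rw [if_pos (show 0 ≤ e ∧ e < 8760 by omega),
            if_neg (show ¬ (s ≥ 0 ∧ e - 1 ≥ 8760) by omega),
            if_pos (show max s 0 ≤ min e 8759 by omega),
            if_neg (show ¬ (s ≥ 0 ∧ e ≥ 8760) by omega),
            show min e 8759 = e by omega]
        by_cases hem : e - 1 < 0
        · -- e = 0 and s < 0: week 0 is new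
          have hs0 : s < 0 := by omega
          have he' : e = 0 := by omega
          subst he'
          rw [if_pos hs0, if_neg (show ¬ max s 0 ≤ min (0-1) 8759 by omega),
              show max s 0 = 0 by omega]
          norm_num
          rw [if_neg (by simp)]
          have : PySem.List.pyRange 0 (0+1) 1 = [(0:Int)] := PySem.List.pyRange_one_singleton 0
          norm_num at this
          rw [this]
          simp
        · -- e - 1 ≥ 0: same week as e-1, or one new week
          rw [if_pos (show max s 0 ≤ min (e-1) 8759 by omega),
              show min (e-1) 8759 = e - 1 by omega]
          by_cases hmem : min (e / 168) 51 ≤ min ((e-1) / 168) 51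
          · have hw : min (e / 168) 51 = min ((e-1) / 168) 51 := by omega
            rw [if_pos (by
              simp only [List.mem_append, mem_H_iff, List.mem_map,
                PySem.List.mem_pyRange_one]
              refine Or.inl (Or.inr ⟨min (e / 168) 51, ⟨?_, ?_⟩, rfl⟩) <;> omega)]
            rw [hw]
          · rw [if_neg (by
              intro h
              simp [PySem.List.mem_pyRange_one] at h
              omega)]
            rw [show min (e / 168) 51 = min ((e-1) / 168) 51 + 1 by omega,
                PySem.List.pyRange_one_succ_right (show min (max s 0 / 168) 51 ≤ min ((e-1) / 168) 51 + 1 by omega)]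
            simp [List.map_append]
      · -- region 3: e ≥ 8760: None is new exactly when s ≥ 0 and e = 8760
        rw [if_neg (show ¬ (0 ≤ e ∧ e < 8760) by omega),
            show min (e-1) 8759 = 8759 by omega, show min e 8759 = 8759 by omega]
        by_cases hs : s < 0
        · rw [if_pos hs, if_neg (show ¬ (s ≥ 0 ∧ e - 1 ≥ 8760) by omega),
              if_neg (show ¬ (s ≥ 0 ∧ e ≥ 8760) by omega)]
          rw [if_pos (by simp)]
        · rw [if_neg hs, if_pos (show s ≥ 0 ∧ e ≥ 8760 by omega)]
          by_cases h81 : e - 1 ≥ 8760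
          · rw [if_pos (show s ≥ 0 ∧ e - 1 ≥ 8760 by omega)]
            rw [if_pos (by simp)]
          · rw [if_neg (show ¬ (s ≥ 0 ∧ e - 1 ≥ 8760) by omega)]
            by_cases hm : max s 0 ≤ 8759
            · rw [if_pos hm, if_neg (by intro h; simp at h)]
              simp
            · rw [if_neg hm, if_neg (by intro h; simp at h)]
              simp
  · -- base: e = s, previous accumulator is empty
    have hes : e = s := by omega
    have hnil : Nform s (e-1) = [] := Nform_empty s (e-1) (by omega)
    rw [hnil]
    subst hes
    simp only [List.not_mem_nil, if_false, List.nil_append]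
    by_cases hs : e < 0
    · rw [if_neg (show ¬ (0 ≤ e ∧ e < 8760) by omega), if_pos hs,
          if_neg (show ¬ max e 0 ≤ min e 8759 by omega),
          if_neg (show ¬ (e ≥ 0 ∧ e ≥ 8760) by omega)]
      simp
    · by_cases he8 : e < 8760
      · rw [if_pos (show 0 ≤ e ∧ e < 8760 by omega), if_neg hs,
            if_pos (show max e 0 ≤ min e 8759 by omega),
            if_neg (show ¬ (e ≥ 0 ∧ e ≥ 8760) by omega),
            show min e 8759 = e by omega, show max e 0 = e by omega,
            PySem.List.pyRange_one_singleton]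
        simp
      · rw [if_neg (show ¬ (0 ≤ e ∧ e < 8760) by omega), if_neg hs,
            if_neg (show ¬ max e 0 ≤ min e 8759 by omega),
            if_pos (show e ≥ 0 ∧ e ≥ 8760 by omega)]
        simp

lemma id_weeks_def (s e : Int) :
    id_weeks s e = (PySem.List.pyRange s (e+1) 1).foldl
      (fun week_list hour =>
        if id_week hour ∈ week_list then week_list else week_list ++ [id_week hour]) [] := rfl

lemma A_eq_N_aux (k : Nat) (s : Int) : id_weeks s (s + k) = Nform s (s + k) := by
  induction k with
  | zero =>
    simp only [Nat.cast_zero, add_zero]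
    rw [id_weeks_def, PySem.List.pyRange_one_singleton]
    have h := step_lemma s s le_rfl
    rw [Nform_empty s (s-1) (by omega)] at h
    simpa using h
  | succ k ih =>
    rw [id_weeks_def,
        show s + ((k+1 : Nat) : Int) + 1 = (s + (k : Int) + 1) + 1 by push_cast; ring,
        PySem.List.pyRange_one_succ_right (by omega), List.foldl_append]
    rw [id_weeks_def] at ih
    simp only [List.foldl_cons, List.foldl_nil]
    rw [ih]
    have h := step_lemma s (s + (k : Int) + 1) (by omega)
    rw [show s + (k : Int) + 1 - 1 = s + (k : Int) by ring] at h
    rw [show s + ((k+1 : Nat) : Int) = s + (k : Int) + 1 by push_cast; ring]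
    exact h

lemma A_eq_N (s e : Int) : id_weeks s e = Nform s e := by
  by_cases hse : s ≤ e
  · have hk : e = s + ((e - s).toNat : Int) := by omega
    rw [hk]; exact A_eq_N_aux _ s
  · rw [id_weeks_def, PySem.List.pyRange_one_eq_nil (by omega), List.foldl_nil,
        Nform_empty s e (by omega)]

-- ---------- B = Nform ----------

lemma week_of_eq (h : Int) :
    week_of h = if 0 ≤ h ∧ h < 8760 then some (min (h / 168) 51) else none := by
  unfold week_of
  rw [PySem.Int.floordiv_eq_ediv_of_pos (show (0:Int) < 168 by norm_num)]

lemma next_week_start_eq (h : Int) (h0 : 0 ≤ h) :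
    next_week_start h = if min (h / 168) 51 = 51 then 8760 else (min (h / 168) 51 + 1) * 168 := by
  unfold next_week_start
  rw [PySem.Int.floordiv_eq_ediv_of_pos (show (0:Int) < 168 by norm_num), if_neg (by omega)]

-- the in-year part of B's loop appends exactly the remaining weeks, then at most one None
lemma loop_inYear : ∀ (n : Nat) (e h : Int) (acc : List (Option Int)),
    (8760 - h).toNat ≤ n → 0 ≤ h → h < 8760 → h ≤ e →
    (∀ w : Int, min (h / 168) 51 ≤ w → (some w) ∉ acc) →
    id_weeks_altLoop e acc h =
      acc ++ (PySem.List.pyRange (min (h / 168) 51) (min (min e 8759 / 168) 51 + 1) 1).map some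
          ++ (if none ∈ acc ∨ e < 8760 then [] else [none]) := by
  intro n
  induction n with
  | zero => intro e h acc hn h0 h8 hhe hacc; omega
  | succ n ih =>
    intro e h acc hn h0 h8 hhe hacc
    have hwk := week_of_eq h
    rw [if_pos ⟨h0, h8⟩] at hwk
    rw [id_weeks_altLoop, dif_pos hhe]
    simp only [hwk]
    rw [if_neg (hacc _ le_rfl)]
    rw [dif_neg (by simp)]
    have hnext := next_week_start_eq h h0
    have hdiv : 168 * (h / 168) ≤ h ∧ h < 168 * (h / 168) + 168 := by omega
    by_cases h51 : min (h / 168) 51 = 51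
    · -- last week of the year: next stop is hour 8760
      rw [hnext, if_pos h51, h51]
      have hh : 8568 ≤ h := by omega
      by_cases he : 8760 ≤ e
      · rw [id_weeks_altLoop, dif_pos he]
        have hw0 : week_of 8760 = none := by rw [week_of_eq]; norm_num
        simp only [hw0]
        have hm : (none ∈ acc ++ [some (51:Int)]) ↔ none ∈ acc := by simp
        have htop : min (min e 8759 / 168) 51 = 51 := by omega
        rw [htop, PySem.List.pyRange_one_singleton]
        by_cases hna : (none : Option Int) ∈ acc
        · rw [if_pos (hm.mpr hna), dif_pos ⟨by simp, by omega⟩,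
              if_pos (by left; exact hna)]
          simp
        · rw [if_neg (by rw [hm]; exact hna), dif_pos ⟨by simp, by omega⟩,
              if_neg (by push_neg; exact ⟨hna, by omega⟩)]
          simp
      · rw [id_weeks_altLoop, dif_neg (by omega)]
        have htop : min (min e 8759 / 168) 51 = 51 := by omega
        rw [htop, PySem.List.pyRange_one_singleton,
            if_pos (by right; omega)]
        simp
    · -- not the last week: next stop is the next week boundary
      have hq : min (h / 168) 51 = h / 168 := by omega
      rw [hnext, if_neg h51, hq]
      set q := h / 168 with hqdef
      have hq51 : q < 51 := by omega
      have hq0 : 0 ≤ q := by omega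
      by_cases he : (q + 1) * 168 ≤ e
      · -- recurse into the next week
        have hnextdiv : ((q + 1) * 168) / 168 = q + 1 := by omega
        have hrec := ih e ((q + 1) * 168) (acc ++ [some q])
          (by omega) (by omega) (by omega) he
          (by
            intro w hw
            rw [hnextdiv] at hw
            simp only [List.mem_append, List.mem_singleton, not_or]
            refine ⟨hacc w (by omega), ?_⟩
            intro hcontra
            have hwq : w = q := by simpa using hcontra
            omega)
        rw [hrec, hnextdiv]
        have hmin : min (q + 1) 51 = q + 1 := by omega
        rw [hmin]
        have hmn : ((none : Option Int) ∈ acc ++ [some q]) ↔ none ∈ acc := by simp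
        have htopge : q + 1 ≤ min (min e 8759 / 168) 51 := by omega
        rw [PySem.List.pyRange_one_cons (show q < min (min e 8759 / 168) 51 + 1 by omega)]
        simp only [hmn, List.map_cons, List.cons_append, List.append_assoc,
          List.nil_append]
      · -- the interval ends inside this week
        rw [id_weeks_altLoop, dif_neg (by omega)]
        have htop : min (min e 8759 / 168) 51 = q := by omega
        rw [htop, PySem.List.pyRange_one_singleton, if_pos (by right; omega)]
        simp

lemma B_eq_N (s e : Int) : id_weeks_alt s e = Nform s e := by
  unfold id_weeks_alt
  by_cases hse : s ≤ e
  · by_cases hs0 : s < 0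
    · -- one step at hour s (< 0), then the loop resumes at hour 0
      rw [id_weeks_altLoop, dif_pos hse]
      have hw : week_of s = none := by rw [week_of_eq, if_neg (by omega)]
      simp only [hw]
      rw [if_neg (by simp), dif_neg (by omega)]
      have hn : next_week_start s = 0 := by unfold next_week_start; rw [if_pos hs0]
      rw [hn]
      simp only [List.nil_append]
      by_cases he0 : 0 ≤ e
      · rw [loop_inYear 8760 e 0 [none] (by omega) le_rfl (by omega) he0
              (by intro w _; simp)]
        rw [Nform_eq s e hse, if_pos hs0,
            if_pos (show max s 0 ≤ min e 8759 by omega),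
            if_neg (show ¬ (s ≥ 0 ∧ e ≥ 8760) by omega),
            show max s 0 = 0 by omega,
            if_pos (by left; simp)]
      · rw [id_weeks_altLoop, dif_neg (by omega)]
        rw [Nform_eq s e hse, if_pos hs0,
            if_neg (show ¬ max s 0 ≤ min e 8759 by omega),
            if_neg (show ¬ (s ≥ 0 ∧ e ≥ 8760) by omega)]
        simp
    · by_cases hs8 : s < 8760
      · rw [loop_inYear 8760 e s [] (by omega) (by omega) hs8 hse (by intro w _; simp)]
        rw [Nform_eq s e hse, if_neg hs0,
            if_pos (show max s 0 ≤ min e 8759 by omega),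
            show max s 0 = s by omega]
        have : ((none : Option Int) ∈ ([] : List (Option Int))) = False := by simp
        by_cases he8 : e < 8760
        · rw [if_pos (by right; exact he8), if_neg (by omega)]
        · rw [if_neg (by simp; omega), if_pos (by omega)]
      · -- s ≥ 8760: the very first hour is past the year
        rw [id_weeks_altLoop, dif_pos hse]
        have hw : week_of s = none := by rw [week_of_eq, if_neg (by omega)]
        simp only [hw]
        rw [if_neg (by simp), dif_pos ⟨by simp, by omega⟩]
        rw [Nform_eq s e hse, if_neg hs0,
            if_neg (show ¬ max s 0 ≤ min e 8759 by omega),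
            if_pos (show s ≥ 0 ∧ e ≥ 8760 by omega)]
        simp
  · rw [id_weeks_altLoop, dif_neg hse, Nform_empty s e (by omega)]

-- ===== VERDICT (by name: the statement is the Claim_ definition above) =====
theorem id_weeks_spec : Claim_equal_id_weeks := by
  intro s e _
  unfold Spec_id_weeks
  rw [A_eq_N, B_eq_N]
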